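-- pv_equiv track=rewrite | github.com/pedro-pacheco/PL2023 | TPC1/main.py | create_chol_distribution_keys
-- ===== SOURCE A (Python) =====
-- def create_chol_distribution_keys(lower_limit, upper_limit):
-- 	l = []
-- 	res = []
-- 	l.append(lower_limit)
-- 	for x in range(lower_limit+1, upper_limit+1):
-- 		if(x%10==0):
-- 			l.append(x-1)
-- 			l.append(x)
-- 	l.remove(upper_limit)
-- 	for x in range(0, len(l)):
-- 		if(x%2==0):
-- 			res.append((l[x], l[x+1]))
-- 	return res
-- ===== SOURCE B (Python) =====
-- def create_chol_distribution_keys(lower_limit, upper_limit):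
--     first = lower_limit // 10 * 10 + 10
--     boundaries = [lower_limit] + list(range(first, upper_limit + 1, 10))
--     starts = list(boundaries)
--     starts.remove(upper_limit)  # same ValueError as A when upper_limit is not a decade boundary above lower_limit
--     return [(s, e - 1) for s, e in zip(starts, boundaries[1:])]
-- ===== Notes on version B (the rewrite author's own statement) =====
-- stated objective: simpler
-- what changed: B generates the decade boundaries directly as a step-10 range starting at the first multiple of 10 above lower_limit and zips starts with the shifted boundary list, instead of scanning every integer in the interval testing %10 and re-pairing by even index; the single remove(upper_limit) call validates upper_limit with the same ValueError as A.
import Mathlib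
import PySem

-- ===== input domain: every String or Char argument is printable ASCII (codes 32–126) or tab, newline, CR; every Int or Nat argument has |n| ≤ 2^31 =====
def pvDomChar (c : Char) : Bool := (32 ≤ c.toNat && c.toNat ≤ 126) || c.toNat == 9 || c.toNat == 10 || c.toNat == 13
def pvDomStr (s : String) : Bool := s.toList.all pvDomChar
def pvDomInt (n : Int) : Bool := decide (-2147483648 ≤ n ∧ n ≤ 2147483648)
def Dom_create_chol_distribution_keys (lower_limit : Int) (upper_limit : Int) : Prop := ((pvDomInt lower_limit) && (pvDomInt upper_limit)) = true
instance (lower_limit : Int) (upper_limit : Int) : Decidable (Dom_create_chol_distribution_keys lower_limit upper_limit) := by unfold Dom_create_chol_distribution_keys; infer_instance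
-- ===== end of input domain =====

-- B replaces A's scan-every-integer-and-%10 list build and even-index re-pairing by direct generation of
-- the decade boundaries (a step-10 range) zipped with its own shifted tail (objective: simpler).

-- ===== PORT A =====
def create_chol_distribution_keys (lower_limit : Int) (upper_limit : Int) : List (Int × Int) :=
  let l0 : List Int := [lower_limit]
  let l1 : List Int := (PySem.List.pyRange (lower_limit + 1) (upper_limit + 1) 1).foldl
    (fun l x => if PySem.Int.mod x 10 == 0 then l ++ [x - 1, x] else l) l0
  -- l.remove(upper_limit): raises ValueError when upper_limit ∉ l — those inputs are outside Pre_
  let l2 : List Int := (PySem.List.remove? l1 upper_limit).getD l1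
  (PySem.List.pyRange 0 (PySem.List.len l2) 1).foldl
    (fun res x => if PySem.Int.mod x 2 == 0 then
        -- l[x+1] would raise IndexError if out of range; on Pre_ it is always in range (pyGetD default unreachable)
        res ++ [(PySem.List.pyGetD l2 x 0, PySem.List.pyGetD l2 (x + 1) 0)]
      else res) []

-- ===== PORT B =====
def create_chol_distribution_keys_alt (lower_limit : Int) (upper_limit : Int) : List (Int × Int) :=
  let first : Int := PySem.Int.floordiv lower_limit 10 * 10 + 10
  let boundaries : List Int := lower_limit :: PySem.List.pyRange first (upper_limit + 1) 10
  -- starts.remove(upper_limit): same ValueError as A when upper_limit is absent — outside Pre_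
  let starts : List Int := (PySem.List.remove? boundaries upper_limit).getD boundaries
  (starts.zip (PySem.List.slice boundaries (some 1) none)).map (fun p => (p.1, p.2 - 1))

-- ===== PRECONDITION & SPEC =====
-- Pre_ excludes exactly the inputs on which A's l.remove(upper_limit) raises ValueError
-- (upper_limit below lower_limit, or above it but not a multiple of 10); B's starts.remove raises the same ValueError there.
def Pre_create_chol_distribution_keys (lower_limit : Int) (upper_limit : Int) : Prop :=
  upper_limit = lower_limit ∨ (lower_limit < upper_limit ∧ upper_limit % 10 = 0)
instance (lower_limit : Int) (upper_limit : Int) : Decidable (Pre_create_chol_distribution_keys lower_limit upper_limit) := by unfold Pre_create_chol_distribution_keys; infer_instance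

def pvWitness_create_chol_distribution_keys : Int × Int := (3, 30)

def Spec_create_chol_distribution_keys (lower_limit : Int) (upper_limit : Int) (out : List (Int × Int)) : Prop := out = create_chol_distribution_keys_alt lower_limit upper_limit
instance (lower_limit : Int) (upper_limit : Int) (out : List (Int × Int)) : Decidable (Spec_create_chol_distribution_keys lower_limit upper_limit out) := by unfold Spec_create_chol_distribution_keys; infer_instance

-- ===== CLAIM (what is proved, stated in full; the proofs are below) =====
def Claim_equal_create_chol_distribution_keys : Prop := ∀ (lower_limit : Int) (upper_limit : Int), Dom_create_chol_distribution_keys lower_limit upper_limit → Pre_create_chol_distribution_keys lower_limit upper_limit → Spec_create_chol_distribution_keys lower_limit upper_limit (create_chol_distribution_keys lower_limit upper_limit)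
-- ===== LEMMAS AND PROOFS =====

-- step-10 range: cons and nil forms (specialisations of PySem.List.pyRange_of_pos to the literal step 10)
lemma pyRange10_nil {a b : Int} (h : b ≤ a) : PySem.List.pyRange a b 10 = [] := by
  rw [PySem.List.pyRange_of_pos a b (by norm_num)]
  simp [show ¬ a < b by omega]

lemma pyRange10_cons {a b : Int} (h : a < b) :
    PySem.List.pyRange a b 10 = a :: PySem.List.pyRange (a + 10) b 10 := by
  rw [PySem.List.pyRange_of_pos a b (by norm_num), PySem.List.pyRange_of_pos (a+10) b (by norm_num)]
  have h1 : ((b - a + 10 - 1) / 10).toNat = (if a + 10 < b then ((b - (a+10) + 10 - 1) / 10).toNat else 0) + 1 := by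
    split_ifs with h2 <;> omega
  rw [if_pos h, h1, List.range_succ_eq_map]
  simp only [List.map_cons, List.map_map, Function.comp_def]
  refine congrArg₂ List.cons (by push_cast; ring) (List.map_congr_left ?_)
  intro k _
  push_cast [Nat.succ_eq_add_one]
  ring

-- the multiples of 10 among lower+1 … upper are exactly the step-10 range from the first multiple above lower
lemma filter_mod10 : ∀ (n : Nat) (a b : Int), b ≤ a + n →
    (PySem.List.pyRange a b 1).filter (fun x => PySem.Int.mod x 10 == 0)
      = PySem.List.pyRange (PySem.Int.floordiv (a - 1) 10 * 10 + 10) b 10 := by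
  intro n
  induction n with
  | zero =>
    intro a b h
    rw [PySem.List.pyRange_one_eq_nil (by omega)]
    rw [pyRange10_nil]
    · rfl
    · have := PySem.Int.floordiv_eq_ediv_of_pos (a := a - 1) (b := 10) (by norm_num)
      omega
  | succ n ih =>
    intro a b h
    by_cases hab : a < b
    · rw [PySem.List.pyRange_one_cons hab, List.filter_cons]
      have hda := PySem.Int.floordiv_eq_ediv_of_pos (a := a - 1) (b := 10) (by norm_num)
      have hda' := PySem.Int.floordiv_eq_ediv_of_pos (a := a) (b := 10) (by norm_num)
      have htail := ih (a + 1) b (by omega)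
      simp only [show a + 1 - 1 = a by ring] at htail
      by_cases h10 : a % 10 = 0
      · rw [if_pos (by simp [h10]), htail]
        rw [show PySem.Int.floordiv (a-1) 10 * 10 + 10 = a by omega,
            show PySem.Int.floordiv a 10 * 10 + 10 = a + 10 by omega]
        exact (pyRange10_cons hab).symm
      · rw [if_neg (by simp [h10]), htail]
        congr 1
        omega
    · rw [PySem.List.pyRange_one_eq_nil (by omega), pyRange10_nil]
      · rfl
      · have := PySem.Int.floordiv_eq_ediv_of_pos (a := a - 1) (b := 10) (by norm_num)
        omega

-- a flatMap of two-element chunks over a range: length and elementwise description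
lemma flat2_length (f g : Nat → Int) (n : Nat) :
    ((List.range n).flatMap (fun k => [f k, g k])).length = 2 * n := by
  induction n with
  | zero => simp
  | succ n ih =>
    rw [List.range_succ, List.flatMap_append]
    simp [ih]
    omega

lemma flat2_getD (f g : Nat → Int) : ∀ (n j : Nat), j < 2 * n →
    ((List.range n).flatMap (fun k => [f k, g k])).getD j 0
      = if j % 2 = 0 then f (j / 2) else g (j / 2) := by
  intro n
  induction n with
  | zero => intro j hj; omega
  | succ n ih =>
    intro j hj
    rw [List.range_succ, List.flatMap_append]
    by_cases hlt : j < 2 * n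
    · rw [List.getD_append _ _ _ j (by rw [flat2_length]; omega), ih j hlt]
    · rw [List.getD_append_right _ _ _ j (by rw [flat2_length]; omega), flat2_length]
      rcases (by omega : j = 2 * n ∨ j = 2 * n + 1) with h | h <;> subst h
      · rw [if_pos (by omega), show 2 * n - 2 * n = 0 from by omega,
            show 2 * n / 2 = n from by omega]
        simp
      · rw [if_neg (by omega), show 2 * n + 1 - 2 * n = 1 from by omega,
            show (2 * n + 1) / 2 = n from by omega]
        simp

-- the even indices of range(2n) are 0,2,…,2n-2
lemma range_filter_even : ∀ (n : Nat),
    (List.range (2 * n)).filter (fun k => k % 2 == 0) = (List.range n).map (fun i => 2 * i) := by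
  intro n
  induction n with
  | zero => simp
  | succ n ih =>
    rw [show 2 * (n + 1) = 2 * n + 1 + 1 from by omega, List.range_succ, List.range_succ,
        List.filter_append, List.filter_append, ih, List.range_succ, List.map_append]
    simp [Nat.add_mod, Nat.mul_mod_right]

theorem create_chol_distribution_keys_spec : Claim_equal_create_chol_distribution_keys := by
  intro lo up _ hpre
  unfold Spec_create_chol_distribution_keys create_chol_distribution_keys
    create_chol_distribution_keys_alt
  simp only []
  have hfd : PySem.Int.floordiv lo 10 = lo / 10 :=
    PySem.Int.floordiv_eq_ediv_of_pos (by norm_num)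
  have hl1 : List.foldl (fun l x => if PySem.Int.mod x 10 == 0 then l ++ [x - 1, x] else l) [lo]
      (PySem.List.pyRange (lo + 1) (up + 1) 1)
      = [lo] ++ (PySem.List.pyRange (PySem.Int.floordiv lo 10 * 10 + 10) (up + 1) 10).flatMap
          (fun x => [x - 1, x]) := by
    rw [PySem.List.foldl_if_eq_foldl_filter, PySem.List.foldl_append_eq_flatMap,
        filter_mod10 (up + 1 - (lo + 1)).toNat (lo + 1) (up + 1)
          (by rcases hpre with h | h <;> omega),
        show lo + 1 - 1 = lo from by ring]
  rw [hl1]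
  rcases hpre with hup | ⟨hlt, hmod⟩
  · -- upper_limit == lower_limit: both sides are []
    subst hup
    rw [pyRange10_nil (by omega)]
    simp [PySem.List.remove?_cons_self, PySem.List.len_eq, PySem.List.pyRange_one_eq_nil]
  · -- lower_limit < upper_limit, upper_limit a multiple of 10
    have hfu : PySem.Int.floordiv lo 10 * 10 + 10 ≤ up := by omega
    obtain ⟨c, hc⟩ : ∃ c : Nat, up = PySem.Int.floordiv lo 10 * 10 + 10 + 10 * c :=
      ⟨((up - (PySem.Int.floordiv lo 10 * 10 + 10)) / 10).toNat, by omega⟩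
    rw [PySem.List.pyRange_of_pos _ (up + 1) (by norm_num), if_pos (by omega),
        show ((up + 1 - (PySem.Int.floordiv lo 10 * 10 + 10) + 10 - 1) / 10).toNat = c + 1
          from by omega]
    set first := PySem.Int.floordiv lo 10 * 10 + 10 with hfirst
    -- name the flattened boundary list and split off its last chunk [up-1, up]
    rw [show ((List.range (c + 1)).map (fun k : Nat => first + 10 * (k : Int))).flatMap
          (fun x => [x - 1, x])
        = (List.range (c + 1)).flatMap (fun k : Nat => [first + 10 * (k : Int) - 1, first + 10 * (k : Int)])
        from by rw [List.flatMap_map]]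
    rw [List.range_succ, List.flatMap_append,
        show (List.flatMap (fun k : Nat => [first + 10 * (k : Int) - 1, first + 10 * (k : Int)]) [c])
          = [up - 1, up] from by simp [hc]]
    set flatc := (List.range c).flatMap
      (fun k : Nat => [first + 10 * (k : Int) - 1, first + 10 * (k : Int)]) with hflatc
    have hflen : flatc.length = 2 * c := flat2_length _ _ c
    have hnotmem : up ∉ lo :: (flatc ++ [up - 1]) := by
      rw [hflatc]
      simp only [List.mem_cons, List.mem_append, List.mem_flatMap, List.mem_range,
        List.not_mem_nil, or_false]
      push Not
      exact ⟨by omega, fun k hk => ⟨by omega, by omega⟩, by omega⟩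
    have hremove :
        PySem.List.remove? (lo :: (flatc ++ [up - 1] ++ [up])) up
          = some (lo :: (flatc ++ [up - 1])) := by
      rw [show lo :: (flatc ++ [up - 1] ++ [up]) = (lo :: (flatc ++ [up - 1])) ++ [up]
            from by simp,
          PySem.List.remove?_eq_some_erase _ up (by simp),
          List.erase_append_right _ hnotmem]
      simp
    rw [show [lo] ++ (flatc ++ [up - 1, up]) = lo :: (flatc ++ [up - 1] ++ [up]) from by simp,
        hremove, Option.getD_some]
    set l2 := lo :: (flatc ++ [up - 1]) with hl2
    have hl2len : l2.length = 2 * c + 2 := by simp [hl2, hflen]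
    -- A's pairing loop: filter the even indices, then map
    rw [PySem.List.foldl_if_eq_foldl_filter, PySem.List.foldl_append_singleton_eq_map,
        PySem.List.len_eq, hl2len, show ((2 * c + 2 : Nat) : Int) = ((2 * (c + 1) : Nat) : Int)
          from by push_cast; ring,
        PySem.List.pyRange_zero_natCast, List.filter_map,
        List.filter_congr (q := fun k : Nat => k % 2 == 0) (by
          intro k _
          have hm := PySem.Int.mod_eq_emod_of_pos (a := (k : Int)) (b := 2) (by norm_num)
          show (PySem.Int.mod ((k : Nat) : Int) 2 == 0) = (k % 2 == 0)
          rw [hm, Bool.eq_iff_iff, beq_iff_eq, beq_iff_eq]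
          omega),
        range_filter_even]
    -- B: remove drops the final boundary (= upper_limit); pair starts with the shifted tail
    have hbn : List.map (fun k : Nat => first + 10 * (k : Int)) (List.range c ++ [c])
        = List.map (fun k : Nat => first + 10 * (k : Int)) (List.range c) ++ [up] := by
      rw [List.map_append]
      simp [hc]
    rw [hbn]
    have hnm2 : up ∉ lo :: List.map (fun k : Nat => first + 10 * (k : Int)) (List.range c) := by
      simp only [List.mem_cons, List.mem_map, List.mem_range]
      push Not
      exact ⟨by omega, fun k hk => by omega⟩
    have hrem2 : PySem.List.remove?
        (lo :: (List.map (fun k : Nat => first + 10 * (k : Int)) (List.range c) ++ [up])) up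
        = some (lo :: List.map (fun k : Nat => first + 10 * (k : Int)) (List.range c)) := by
      rw [show lo :: (List.map (fun k : Nat => first + 10 * (k : Int)) (List.range c) ++ [up])
            = (lo :: List.map (fun k : Nat => first + 10 * (k : Int)) (List.range c)) ++ [up]
            from by simp,
          PySem.List.remove?_eq_some_erase _ up (by simp),
          List.erase_append_right _ hnm2]
      simp
    rw [hrem2, Option.getD_some, PySem.List.slice_from_one]
    rw [show (lo :: (List.map (fun k : Nat => first + 10 * (k : Int)) (List.range c) ++ [up])).tail
          = List.map (fun k : Nat => first + 10 * (k : Int)) (List.range (c + 1))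
          from by rw [List.tail_cons, List.range_succ, List.map_append]; simp [hc]]
    simp only [List.map_map, List.nil_append]
    apply List.ext_getElem
    · simp
    · intro i h1 h2
      have hi' : i < c + 1 := by simpa using h1
      simp only [List.getElem_map, List.getElem_zip, Function.comp_apply, List.getElem_range]
      have e1 : PySem.List.pyGetD l2 ((2 * i : Nat) : Int) 0 = l2.getD (2 * i) 0 :=
        PySem.List.pyGetD_natCast _ _ _
      have e2 : PySem.List.pyGetD l2 (((2 * i : Nat) : Int) + 1) 0 = l2.getD (2 * i + 1) 0 := by
        rw [show (((2 * i : Nat) : Int) + 1) = ((2 * i + 1 : Nat) : Int) from by push_cast; ring]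
        exact PySem.List.pyGetD_natCast _ _ _
      -- first components agree
      have hfst : l2.getD (2 * i) 0
          = (lo :: (List.range c).map (fun k : Nat => first + 10 * (k : Int))).getD i 0 := by
        rcases Nat.eq_zero_or_pos i with h0 | hpos
        · subst h0; simp [hl2]
        · rw [show (2 * i : Nat) = (2 * i - 1) + 1 from by omega, hl2, List.getD_cons_succ,
              List.getD_append _ _ _ _ (by rw [hflen]; omega), hflatc,
              flat2_getD _ _ c (2 * i - 1) (by omega), if_neg (by omega),
              show (2 * i - 1) / 2 = i - 1 from by omega,
              show i = (i - 1) + 1 from by omega, List.getD_cons_succ,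
              PySem.List.getD_map_range _ _ _ _ (by omega)]
          congr 2
      -- second components agree
      have hsnd : l2.getD (2 * i + 1) 0 = first + 10 * (i : Int) - 1 := by
        rcases Nat.lt_or_ge i c with hic | hic
        · rw [hl2, List.getD_cons_succ, List.getD_append _ _ _ _ (by rw [hflen]; omega), hflatc,
              flat2_getD _ _ c (2 * i) (by omega), if_pos (by omega),
              show 2 * i / 2 = i from by omega]
        · have hieq : i = c := by omega
          subst hieq
          rw [hl2, List.getD_cons_succ, List.getD_append_right _ _ _ _ (by rw [hflen]),
              hflen, show 2 * i - 2 * i = 0 from by omega]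
          simp [hc]
      rw [e1, e2, hfst, hsnd, List.getD_eq_getElem _ _ (by simpa using hi')]
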